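-- pv_equiv track=rewrite | github.com/alexandraback/datacollection | solutions_2449486_0/Python/dailycoffee/solve.py | solve
-- ===== SOURCE A (Python) =====
-- from copy import deepcopy
--
-- def run_row(lawn, row, height):
--     new_lawn = deepcopy(lawn)
--     for col in range(len(new_lawn[0])):
--         h = new_lawn[row][col]
--         new_lawn[row][col] = min(height, h)
--     return new_lawn
--
-- def run_col(lawn, col, height):
--     new_lawn = deepcopy(lawn)
--     for row in range(len(new_lawn)):
--         h = new_lawn[row][col]
--         new_lawn[row][col] = min(height, h)
--     return new_lawn
--
-- def possible(lawn, target):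
--     return all(i >= j for i, j in zip(
--         [i for row in lawn for i in row],
--         [i for row in target for i in row]
--     ))
--
-- def solve(lawn):
--     rows = len(lawn)
--     cols = len(lawn[0])
--     cur_lawn = [[100] * cols for _r in range(rows)]
--     heights = sorted(list({i for row in lawn for i in row}), key=lambda x: -x)
--     for h in heights:
--         for r in range(rows):
--             new_lawn = run_row(cur_lawn, r, h)
--             if possible(new_lawn, lawn):
--                 cur_lawn = new_lawn
--         for c in range(cols):
--             new_lawn = run_col(cur_lawn, c, h)
--             if possible(new_lawn, lawn):
--                 cur_lawn = new_lawn
--     if lawn == cur_lawn: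
--         return 'YES'
--     return 'NO'
-- ===== SOURCE B (Python) =====
-- def solve(lawn):
--     # Build the tallest lawn a mower could leave: every cell of the rows x cols
--     # grid is min(100, its row's max, its column's max); achievable iff equal.
--     cols = len(lawn[0])
--     col_max = {}
--     for row in lawn:
--         for c, v in enumerate(row):
--             col_max[c] = max(col_max.get(c, v), v)
--     target = [[min(100, max(row), col_max[c]) for c in range(cols)] for row in lawn]
--     return 'YES' if lawn == target else 'NO'
-- ===== Notes on version B (the rewrite author's own statement) =====
-- stated objective: faster
-- what changed: A simulates greedy mower passes (for every distinct height it re-runs every row and column pass on a copied lawn, re-checking the whole lawn each time); B precomputes row maxima and, in one dict pass, column maxima, builds the canonical mowed lawn whose cells are min(100, row max, column max), and compares once.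
-- outside the precondition, e.g. on solve([[1], []]): A returns 'NO', B raises ValueError
import Mathlib
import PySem

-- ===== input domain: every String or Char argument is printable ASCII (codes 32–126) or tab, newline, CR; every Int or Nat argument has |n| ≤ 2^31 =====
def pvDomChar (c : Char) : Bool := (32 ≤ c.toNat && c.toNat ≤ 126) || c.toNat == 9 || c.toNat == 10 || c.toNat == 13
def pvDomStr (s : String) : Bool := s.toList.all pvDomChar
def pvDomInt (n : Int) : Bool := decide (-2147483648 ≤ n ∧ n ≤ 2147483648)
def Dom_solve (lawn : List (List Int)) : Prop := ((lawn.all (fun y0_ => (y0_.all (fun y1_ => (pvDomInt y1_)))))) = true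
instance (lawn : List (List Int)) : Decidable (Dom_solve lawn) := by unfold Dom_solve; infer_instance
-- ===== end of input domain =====

-- B replaces A's repeated simulated mower passes by the closed criterion "every cell equals
-- min(100, its row maximum, its column maximum)", computed from one pass of precomputed maxima.

-- ===== PORT A =====
-- run_row: lower every cell of row `row` to at most `height` (deepcopy = value copy).
def runRow (cur : List (List Int)) (row : Nat) (height : Int) : List (List Int) :=
  (List.range (cur.headD []).length).foldl
    (fun nl col =>
      let h := (nl.getD row []).getD col 0
      nl.set row ((nl.getD row []).set col (min height h)))
    cur

def runCol (cur : List (List Int)) (col : Nat) (height : Int) : List (List Int) :=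
  (List.range cur.length).foldl
    (fun nl row =>
      let h := (nl.getD row []).getD col 0
      nl.set row ((nl.getD row []).set col (min height h)))
    cur

def possible (l target : List (List Int)) : Bool :=
  (l.flatten.zip target.flatten).all (fun p => p.2 ≤ p.1)

-- range(len(...)) loops are over the Nat range; the Python indexes here are always in range.
def solve (lawn : List (List Int)) : String :=
  let rows := lawn.length
  let cols := (lawn.headD []).length
  let cur0 := List.replicate rows (List.replicate cols (100 : Int))
  let heights := PySem.List.sorted (PySem.Set.ofList lawn.flatten) (fun x => -x)
  let fin := heights.foldl
    (fun cur h =>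
      let cur1 := (List.range rows).foldl
        (fun cur r => let nl := runRow cur r h; if possible nl lawn then nl else cur) cur
      (List.range cols).foldl
        (fun cur c => let nl := runCol cur c h; if possible nl lawn then nl else cur) cur1)
    cur0
  if lawn = fin then "YES" else "NO"

-- ===== PORT B =====
-- B builds the tallest lawn a mower could leave (cell = min(100, row max, column max))
-- and compares; the column maxima are collected in one dict pass over the cells.
def solve_alt (lawn : List (List Int)) : String :=
  let cols := (lawn.headD []).length
  let colMax := lawn.foldl
    (fun d row => (PySem.List.enumerate row).foldl
      (fun d q => d.insert q.1 (max (d.getD q.1 q.2) q.2)) d)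
    PySem.Dict.empty
  let target := lawn.map (fun row => (List.range cols).map
    (fun (c : Nat) => min (min 100 ((PySem.List.max? row (fun x => x)).getD 0)) (colMax.getD (c : Int) 0)))
  if lawn = target then "YES" else "NO"

-- ===== PRECONDITION & SPEC =====
-- Pre_ excludes the empty lawn, on which A raises IndexError, and lawns that have an empty
-- row together with a nonempty first row, on which B's max(row) raises ValueError while A's
-- truncating zip-comparison yields an accidental 'NO'.
def Pre_solve (lawn : List (List Int)) : Prop :=
  lawn ≠ [] ∧ (0 < (lawn.headD []).length → ∀ row ∈ lawn, row ≠ [])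
instance (lawn : List (List Int)) : Decidable (Pre_solve lawn) := by unfold Pre_solve; infer_instance
def pvWitness_solve : List (List Int) := [[1, 2], [2, 2]]

def Spec_solve (lawn : List (List Int)) (out : String) : Prop := out = solve_alt lawn
instance (lawn : List (List Int)) (out : String) : Decidable (Spec_solve lawn out) := by unfold Spec_solve; infer_instance

-- ===== CLAIM (what is proved, stated in full; the proofs are below) =====
def Claim_equal_solve : Prop := ∀ (lawn : List (List Int)), Dom_solve lawn → Pre_solve lawn → Spec_solve lawn (solve lawn)

-- ===== LEMMAS AND PROOFS =====

-- the (r,c) cell of a lawn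
def cellL (x : List (List Int)) (r c : Nat) : Int := (x.getD r []).getD c 0

-- the lawn whose (r,c) cell is min(100, ra r, ca c)
def bld (rows cols : Nat) (ra ca : Nat → Int) : List (List Int) :=
  (List.range rows).map (fun r => (List.range cols).map (fun c => min 100 (min (ra r) (ca c))))

-- row / column maxima, exactly as B computes them
def Rm (lawn : List (List Int)) (r : Nat) : Int :=
  (PySem.List.max? (lawn.getD r []) (fun x => x)).getD 0
def Cm (lawn : List (List Int)) (c : Nat) : Int :=
  (PySem.List.max? (lawn.map (fun row => row.getD c 0)) (fun x => x)).getD 0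

-- every cell of the rows×cols lawn is ≤ 100 (A's initial height)
abbrev SmallLawn (lawn : List (List Int)) (rows cols : Nat) : Prop :=
  ∀ r < rows, ∀ c < cols, cellL lawn r c ≤ 100

theorem headD_eq_getD {α : Type} (l : List α) (d : α) : l.headD d = l.getD 0 d := by
  cases l <;> rfl

theorem length_bld (rows cols : Nat) (ra ca : Nat → Int) : (bld rows cols ra ca).length = rows := by
  simp [bld]

theorem getD_bld {rows : Nat} (cols : Nat) (ra ca : Nat → Int) {r : Nat} (hr : r < rows) :
    (bld rows cols ra ca).getD r []
      = (List.range cols).map (fun c => min 100 (min (ra r) (ca c))) := by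
  rw [bld, List.getD_eq_getElem _ _ (by simpa using hr)]
  simp [hr]

theorem rowlen_bld {rows : Nat} (cols : Nat) (ra ca : Nat → Int) {r : Nat} (hr : r < rows) :
    ((bld rows cols ra ca).getD r []).length = cols := by
  rw [getD_bld cols ra ca hr]; simp

theorem cell_bld {rows cols : Nat} (ra ca : Nat → Int) {r c : Nat} (hr : r < rows) (hc : c < cols) :
    cellL (bld rows cols ra ca) r c = min 100 (min (ra r) (ca c)) := by
  rw [cellL, getD_bld cols ra ca hr]
  simp [List.getD, List.getElem?_range, hc]

theorem bld_congr {rows cols : Nat} {ra ca ra' ca' : Nat → Int}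
    (h1 : ∀ r < rows, ra r = ra' r) (h2 : ∀ c < cols, ca c = ca' c) :
    bld rows cols ra ca = bld rows cols ra' ca' := by
  unfold bld
  apply List.map_congr_left
  intro r hr
  apply List.map_congr_left
  intro c hc
  rw [h1 r (List.mem_range.mp hr), h2 c (List.mem_range.mp hc)]

theorem set_map_range {α : Type} {n r : Nat} (f : Nat → α) (v : α) (hr : r < n) :
    ((List.range n).map f).set r v = (List.range n).map (fun i => if i = r then v else f i) := by
  apply List.ext_getElem
  · simp
  · intro i h1 h2
    simp only [List.length_set, List.length_map, List.length_range] at h1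
    simp [List.getElem_set, List.getElem_map, List.getElem_range]
    split_ifs with hir hri hri
    · rfl
    · omega
    · omega
    · rfl

theorem getD_map_range_at {α : Type} {n i : Nat} (f : Nat → α) (d : α) (hi : i < n) :
    ((List.range n).map f).getD i d = f i := by
  simp [List.getD, List.getElem?_range, hi]

theorem set_getD_self {α : Type} (l : List α) (i : Nat) (d : α) (h : i < l.length) :
    l.set i (l.getD i d) = l := by
  apply List.ext_getElem
  · simp
  · intro j h1 h2
    rw [List.getElem_set]
    split_ifs with hij
    · subst hij; rw [List.getD_eq_getElem _ _ h]
    · rfl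

-- pointwise reading of `possible` on equally-shaped lawns
theorem zip_all_le (a b : List Int) (h : a.length = b.length) :
    ((a.zip b).all (fun p => p.2 ≤ p.1)) = true ↔ ∀ j < a.length, b.getD j 0 ≤ a.getD j 0 := by
  induction a generalizing b with
  | nil => simp
  | cons x xs ih =>
    cases b with
    | nil => simp at h
    | cons y ys =>
      simp only [List.zip_cons_cons, List.all_cons, Bool.and_eq_true, decide_eq_true_eq]
      rw [ih ys (by simpa using h)]
      constructor
      · rintro ⟨h0, hrest⟩ j hj
        cases j with
        | zero => simpa using h0
        | succ j => simpa using hrest j (by simpa using hj)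
      · intro hall
        refine ⟨by simpa using hall 0 (by simp), fun j hj => ?_⟩
        simpa using hall (j + 1) (by simpa using Nat.succ_lt_succ hj)

theorem possible_iff (x y : List (List Int)) (hl : x.length = y.length)
    (hrl : ∀ i < x.length, (x.getD i []).length = (y.getD i []).length) :
    possible x y = true ↔
      ∀ i < x.length, ∀ j < (x.getD i []).length, cellL y i j ≤ cellL x i j := by
  induction x generalizing y with
  | nil => simp [possible]
  | cons w ws ih =>
    cases y with
    | nil => simp at hl
    | cons z zs =>
      have hwz : w.length = z.length := by simpa using hrl 0 (by simp)
      have hih := ih zs (by simpa using hl)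
        (fun i hi => by simpa using hrl (i + 1) (by simpa using Nat.succ_lt_succ hi))
      unfold possible
      rw [List.flatten_cons, List.flatten_cons, List.zip_append hwz, List.all_append,
        Bool.and_eq_true, zip_all_le w z hwz]
      have hih' : ((ws.flatten.zip zs.flatten).all (fun p => p.2 ≤ p.1) = true)
          ↔ (∀ i < ws.length, ∀ j < (ws.getD i []).length, cellL zs i j ≤ cellL ws i j) := hih
      rw [hih']
      constructor
      · rintro ⟨h0, h1⟩ i hi j hj
        match i with
        | 0 =>
          have := h0 j (by simpa [List.getD_cons_zero] using hj)
          simpa [cellL, List.getD_cons_zero] using this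
        | Nat.succ i =>
          have := h1 i (by simpa using hi) j (by simpa [List.getD_cons_succ] using hj)
          simpa [cellL, List.getD_cons_succ] using this
      · intro hall
        constructor
        · intro j hj
          have := hall 0 (by simp) j (by simpa [List.getD_cons_zero] using hj)
          simpa [cellL, List.getD_cons_zero] using this
        · intro i hi j hj
          have := hall (i + 1) (by simpa using Nat.succ_lt_succ hi)
            j (by simpa [List.getD_cons_succ] using hj)
          simpa [cellL, List.getD_cons_succ] using this

theorem foldl_sel_le_init (c : Int) (l : List Int) (a : Int) :
    l.foldl (fun a h => if c ≤ h then min a h else a) a ≤ a := by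
  induction l generalizing a with
  | nil => simp
  | cons x xs ih =>
    refine le_trans (ih _) ?_
    dsimp only
    split_ifs
    · exact min_le_left _ _
    · exact le_refl _

theorem le_foldl_sel (x : Int) (l : List Int) (a : Int) (ha : x ≤ a) :
    x ≤ l.foldl (fun a h => if x ≤ h then min a h else a) a := by
  induction l generalizing a with
  | nil => simpa
  | cons y ys ih =>
    simp only [List.foldl_cons]
    apply ih
    split_ifs with hy
    · exact le_min ha hy
    · exact ha

theorem foldl_sel_le_mem (x : Int) (l : List Int) (a : Int) (hx : x ∈ l) :
    l.foldl (fun a h => if x ≤ h then min a h else a) a ≤ x := by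
  induction l generalizing a with
  | nil => simp at hx
  | cons y ys ih =>
    simp only [List.foldl_cons]
    rcases List.mem_cons.mp hx with rfl | hmem
    · refine le_trans (foldl_sel_le_init _ _ _) ?_
      rw [if_pos (le_refl x)]
      exact min_le_right _ _
    · exact ih _ hmem

theorem foldl_sel_mem (x : Int) (l : List Int) (a : Int) (hx : x ∈ l) (ha : x ≤ a) :
    l.foldl (fun a h => if x ≤ h then min a h else a) a = x :=
  le_antisymm (foldl_sel_le_mem x l a hx) (le_foldl_sel x l a ha)


theorem runRow_bld {rows cols : Nat} (ra ca : Nat → Int) {r : Nat} (hgt : Int)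
    (hr : r < rows) :
    runRow (bld rows cols ra ca) r hgt
      = bld rows cols (fun r' => if r' = r then min (ra r') hgt else ra r') ca := by
  have h0r : 0 < rows := Nat.lt_of_le_of_lt (Nat.zero_le r) hr
  have hblen : (bld rows cols ra ca).length = rows := length_bld rows cols ra ca
  have hlen : ((bld rows cols ra ca).headD []).length = cols := by
    rw [headD_eq_getD, rowlen_bld cols ra ca h0r]
  unfold runRow
  rw [hlen]
  have aux : ∀ k, k ≤ cols →
      (List.range k).foldl
        (fun nl col =>
          let h := (nl.getD r []).getD col 0
          nl.set r ((nl.getD r []).set col (min hgt h)))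
        (bld rows cols ra ca)
      = (bld rows cols ra ca).set r ((List.range cols).map (fun c =>
          if c < k then min 100 (min (min (ra r) hgt) (ca c))
          else min 100 (min (ra r) (ca c)))) := by
    intro k
    induction k with
    | zero =>
      intro _
      simp only [List.range_zero, List.foldl_nil]
      have hmap : ((List.range cols).map (fun c =>
          if c < 0 then min 100 (min (min (ra r) hgt) (ca c))
          else min 100 (min (ra r) (ca c))))
          = (List.range cols).map (fun c => min 100 (min (ra r) (ca c))) :=
        List.map_congr_left (fun c _ => by simp)
      rw [hmap, ← getD_bld cols ra ca hr,
        set_getD_self _ _ _ (by rw [hblen]; exact hr)]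
    | succ k ih =>
      intro hk
      rw [List.range_succ, List.foldl_append, ih (Nat.le_of_succ_le hk)]
      simp only [List.foldl_cons, List.foldl_nil]
      have hset : r < ((bld rows cols ra ca)).length := by rw [hblen]; exact hr
      have hgetD : (((bld rows cols ra ca)).set r ((List.range cols).map (fun c =>
          if c < k then min 100 (min (min (ra r) hgt) (ca c))
          else min 100 (min (ra r) (ca c))))).getD r []
          = (List.range cols).map (fun c =>
              if c < k then min 100 (min (min (ra r) hgt) (ca c))
              else min 100 (min (ra r) (ca c))) := by
        simp [List.getD, List.getElem?_set_self hset]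
      rw [hgetD, List.set_set]
      congr 1
      rw [getD_map_range_at _ _ (Nat.lt_of_succ_le hk),
        set_map_range _ _ (Nat.lt_of_succ_le hk)]
      apply List.map_congr_left
      intro c hcmem
      by_cases hck : c = k
      · subst hck
        simp only [if_pos rfl, if_neg (lt_irrefl c), if_pos (Nat.lt_succ_self c)]
        simp [min_comm, min_left_comm]
      · rw [if_neg hck]
        by_cases hlt : c < k
        · rw [if_pos hlt, if_pos (Nat.lt_succ_of_lt hlt)]
        · rw [if_neg hlt, if_neg (by omega)]
  rw [aux cols le_rfl]
  have hmap2 : ((List.range cols).map (fun c =>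
      if c < cols then min 100 (min (min (ra r) hgt) (ca c))
      else min 100 (min (ra r) (ca c))))
      = (List.range cols).map (fun c => min 100 (min (min (ra r) hgt) (ca c))) :=
    List.map_congr_left (fun c hc => by rw [if_pos (List.mem_range.mp hc)])
  rw [hmap2]
  unfold bld
  rw [set_map_range _ _ hr]
  apply List.map_congr_left
  intro i hi
  by_cases hir : i = r
  · subst hir; rw [if_pos rfl]
    exact List.map_congr_left (fun c _ => by simp)
  · rw [if_neg hir]
    exact List.map_congr_left (fun c _ => by simp [hir])

theorem runCol_bld {rows cols : Nat} (ra ca : Nat → Int) {c : Nat} (hgt : Int)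
    (hc : c < cols) :
    runCol (bld rows cols ra ca) c hgt
      = bld rows cols ra (fun c' => if c' = c then min (ca c') hgt else ca c') := by
  unfold runCol
  rw [length_bld]
  have aux : ∀ k, k ≤ rows →
      (List.range k).foldl
        (fun nl row =>
          let h := (nl.getD row []).getD c 0
          nl.set row ((nl.getD row []).set c (min hgt h)))
        (bld rows cols ra ca)
      = (List.range rows).map (fun i => (List.range cols).map (fun c' =>
          if i < k ∧ c' = c then min 100 (min (ra i) (min (ca c') hgt))
          else min 100 (min (ra i) (ca c')))) := by
    intro k
    induction k with
    | zero =>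
      intro _
      simp only [List.range_zero, List.foldl_nil]
      unfold bld
      exact List.map_congr_left (fun i _ =>
        List.map_congr_left (fun c' _ => by simp))
    | succ k ih =>
      intro hk
      have hkrows : k < rows := Nat.lt_of_succ_le hk
      rw [List.range_succ, List.foldl_append, ih (Nat.le_of_succ_le hk)]
      simp only [List.foldl_cons, List.foldl_nil]
      rw [getD_map_range_at _ _ hkrows]
      have hrow : ((List.range cols).map (fun c' =>
          if k < k ∧ c' = c then min 100 (min (ra k) (min (ca c') hgt))
          else min 100 (min (ra k) (ca c'))))
          = (List.range cols).map (fun c' => min 100 (min (ra k) (ca c'))) :=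
        List.map_congr_left (fun c' _ => by simp)
      rw [hrow, getD_map_range_at _ _ hc, set_map_range _ _ hc, set_map_range _ _ hkrows]
      apply List.map_congr_left
      intro i hi
      by_cases hik : i = k
      · subst hik
        rw [if_pos rfl]
        apply List.map_congr_left
        intro c' _
        by_cases hcc : c' = c
        · subst hcc
          rw [if_pos rfl, if_pos ⟨Nat.lt_succ_self i, rfl⟩]
          simp [min_comm, min_left_comm]
        · rw [if_neg hcc, if_neg (by exact fun hcon => hcc hcon.2)]
      · rw [if_neg hik]
        apply List.map_congr_left
        intro c' _
        by_cases hik2 : i < k ∧ c' = c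
        · rw [if_pos hik2, if_pos ⟨Nat.lt_succ_of_lt hik2.1, hik2.2⟩]
        · rw [if_neg hik2, if_neg (by
            rintro ⟨h1, h2⟩
            exact hik2 ⟨by omega, h2⟩)]
  rw [aux rows le_rfl]
  unfold bld
  apply List.map_congr_left
  intro i hi
  apply List.map_congr_left
  intro c' _
  by_cases hcc : c' = c
  · subst hcc
    rw [if_pos ⟨List.mem_range.mp hi, rfl⟩]
    simp
  · rw [if_neg (fun hcon => hcc hcon.2)]
    simp [hcc]

-- row / column maximum facts
theorem cell_le_Rm {lawn : List (List Int)} {r c : Nat}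
    (hc : c < (lawn.getD r []).length) : cellL lawn r c ≤ Rm lawn r := by
  cases hmax : PySem.List.max? (lawn.getD r []) (fun x => x) with
  | none =>
    rw [PySem.List.max?_eq_none_iff] at hmax
    rw [hmax] at hc
    simp at hc
  | some m =>
    have hmem : cellL lawn r c ∈ lawn.getD r [] := by
      rw [cellL, List.getD_eq_getElem _ _ hc]
      exact List.getElem_mem hc
    have := PySem.List.max?_isMax hmax _ hmem
    rw [Rm, hmax]
    simpa using this

theorem Rm_attained {lawn : List (List Int)} {r : Nat}
    (hne : (lawn.getD r []).length ≠ 0) :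
    ∃ c < (lawn.getD r []).length, cellL lawn r c = Rm lawn r := by
  cases hmax : PySem.List.max? (lawn.getD r []) (fun x => x) with
  | none =>
    rw [PySem.List.max?_eq_none_iff] at hmax
    rw [hmax] at hne
    simp at hne
  | some m =>
    have hmem := PySem.List.max?_mem hmax
    obtain ⟨ci, hci, hcm⟩ := List.mem_iff_getElem.mp hmem
    exact ⟨ci, hci, by rw [cellL, List.getD_eq_getElem _ _ hci, hcm, Rm, hmax]; rfl⟩

theorem cell_le_Cm {lawn : List (List Int)} {r c : Nat} (hr : r < lawn.length) :
    cellL lawn r c ≤ Cm lawn c := by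
  cases hmax : PySem.List.max? (lawn.map (fun row => row.getD c 0)) (fun x => x) with
  | none =>
    rw [PySem.List.max?_eq_none_iff] at hmax
    simp at hmax
    rw [hmax] at hr
    simp at hr
  | some m =>
    have hmem : cellL lawn r c ∈ lawn.map (fun row => row.getD c 0) := by
      rw [cellL, List.getD_eq_getElem _ _ hr]
      exact List.mem_map.mpr ⟨lawn[r], List.getElem_mem hr, rfl⟩
    have := PySem.List.max?_isMax hmax _ hmem
    rw [Cm, hmax]
    simpa using this

theorem Cm_attained {lawn : List (List Int)} {c : Nat} (hne : lawn ≠ []) :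
    ∃ r < lawn.length, cellL lawn r c = Cm lawn c := by
  cases hmax : PySem.List.max? (lawn.map (fun row => row.getD c 0)) (fun x => x) with
  | none =>
    rw [PySem.List.max?_eq_none_iff] at hmax
    simp at hmax
    exact absurd hmax hne
  | some m =>
    have hmem := PySem.List.max?_mem hmax
    obtain ⟨ri, hri, hrm⟩ := List.mem_iff_getElem.mp hmem
    rw [List.length_map] at hri
    refine ⟨ri, hri, ?_⟩
    rw [List.getElem_map] at hrm
    rw [cellL, List.getD_eq_getElem _ _ hri, hrm, Cm, hmax]
    rfl

theorem poss_row_iff {lawn : List (List Int)} {rows cols r : Nat} (hgt : Int)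
    (ra ca : Nat → Int)
    (hrows : lawn.length = rows) (hrect : ∀ i < rows, (lawn.getD i []).length = cols)
    (h0c : 0 < cols) (hr : r < rows)
    (hra : ∀ i < rows, SmallLawn lawn rows cols → Rm lawn i ≤ ra i)
    (hca : ∀ j < cols, SmallLawn lawn rows cols → Cm lawn j ≤ ca j) :
    (possible (bld rows cols (fun r' => if r' = r then min (ra r') hgt else ra r') ca) lawn = true)
      ↔ (SmallLawn lawn rows cols ∧ Rm lawn r ≤ hgt) := by
  rw [possible_iff _ _ (by rw [length_bld, hrows])
    (fun i hi => by
      rw [length_bld] at hi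
      rw [rowlen_bld _ _ _ hi, hrect i hi])]
  constructor
  · intro hall
    have hcell : ∀ i < rows, ∀ j < cols,
        cellL lawn i j ≤ min 100 (min (if i = r then min (ra i) hgt else ra i) (ca j)) := by
      intro i hi j hj
      have := hall i (by rw [length_bld]; exact hi) j (by rw [rowlen_bld _ _ _ hi]; exact hj)
      rwa [cell_bld _ _ hi hj] at this
    have hsm : SmallLawn lawn rows cols := by
      intro i hi j hj
      exact le_trans (hcell i hi j hj) (min_le_left _ _)
    refine ⟨hsm, ?_⟩
    obtain ⟨c0, hc0, hc0eq⟩ := Rm_attained (lawn := lawn) (r := r) (by rw [hrect r hr]; omega)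
    rw [hrect r hr] at hc0
    have h1 := hcell r hr c0 hc0
    rw [hc0eq, if_pos rfl] at h1
    calc Rm lawn r ≤ min 100 (min (min (ra r) hgt) (ca c0)) := h1
      _ ≤ min (min (ra r) hgt) (ca c0) := min_le_right _ _
      _ ≤ min (ra r) hgt := min_le_left _ _
      _ ≤ hgt := min_le_right _ _
  · rintro ⟨hsm, hRh⟩
    intro i hi j hj
    rw [length_bld] at hi
    rw [rowlen_bld _ _ _ hi] at hj
    rw [cell_bld _ _ hi hj]
    have hcr : cellL lawn i j ≤ Rm lawn i := cell_le_Rm (by rw [hrect i hi]; exact hj)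
    refine le_min (hsm i hi j hj) (le_min ?_ ?_)
    · by_cases hir : i = r
      · subst hir
        rw [if_pos rfl]
        exact le_min (le_trans hcr (hra i hi hsm)) (le_trans hcr hRh)
      · rw [if_neg hir]
        exact le_trans hcr (hra i hi hsm)
    · exact le_trans (cell_le_Cm (by rw [hrows]; exact hi)) (hca j hj hsm)

theorem poss_col_iff {lawn : List (List Int)} {rows cols c : Nat} (hgt : Int)
    (ra ca : Nat → Int)
    (hrows : lawn.length = rows) (hrect : ∀ i < rows, (lawn.getD i []).length = cols)
    (h0r : 0 < rows) (hc : c < cols)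
    (hra : ∀ i < rows, SmallLawn lawn rows cols → Rm lawn i ≤ ra i)
    (hca : ∀ j < cols, SmallLawn lawn rows cols → Cm lawn j ≤ ca j) :
    (possible (bld rows cols ra (fun c' => if c' = c then min (ca c') hgt else ca c')) lawn = true)
      ↔ (SmallLawn lawn rows cols ∧ Cm lawn c ≤ hgt) := by
  rw [possible_iff _ _ (by rw [length_bld, hrows])
    (fun i hi => by
      rw [length_bld] at hi
      rw [rowlen_bld _ _ _ hi, hrect i hi])]
  constructor
  · intro hall
    have hcell : ∀ i < rows, ∀ j < cols,
        cellL lawn i j ≤ min 100 (min (ra i) (if j = c then min (ca j) hgt else ca j)) := by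
      intro i hi j hj
      have := hall i (by rw [length_bld]; exact hi) j (by rw [rowlen_bld _ _ _ hi]; exact hj)
      rwa [cell_bld _ _ hi hj] at this
    have hsm : SmallLawn lawn rows cols := by
      intro i hi j hj
      exact le_trans (hcell i hi j hj) (min_le_left _ _)
    refine ⟨hsm, ?_⟩
    obtain ⟨r0, hr0, hr0eq⟩ := Cm_attained (lawn := lawn) (c := c)
      (by intro hnil; rw [hnil] at hrows; simp at hrows; omega)
    rw [hrows] at hr0
    have h1 := hcell r0 hr0 c hc
    rw [hr0eq, if_pos rfl] at h1
    calc Cm lawn c ≤ min 100 (min (ra r0) (min (ca c) hgt)) := h1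
      _ ≤ min (ra r0) (min (ca c) hgt) := min_le_right _ _
      _ ≤ min (ca c) hgt := min_le_right _ _
      _ ≤ hgt := min_le_right _ _
  · rintro ⟨hsm, hCh⟩
    intro i hi j hj
    rw [length_bld] at hi
    rw [rowlen_bld _ _ _ hi] at hj
    rw [cell_bld _ _ hi hj]
    have hcc : cellL lawn i j ≤ Cm lawn j := cell_le_Cm (by rw [hrows]; exact hi)
    refine le_min (hsm i hi j hj)
      (le_min (le_trans (cell_le_Rm (by rw [hrect i hi]; exact hj)) (hra i hi hsm)) ?_)
    by_cases hjc : j = c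
    · subst hjc
      rw [if_pos rfl]
      exact le_min (le_trans hcc (hca j hj hsm)) (le_trans hcc hCh)
    · rw [if_neg hjc]
      exact le_trans hcc (hca j hj hsm)

theorem rowFold {lawn : List (List Int)} {rows cols : Nat} (hgt : Int) (ra ca : Nat → Int)
    (hrows : lawn.length = rows) (hrect : ∀ i < rows, (lawn.getD i []).length = cols)
    (h0c : 0 < cols)
    (hra : ∀ i < rows, SmallLawn lawn rows cols → Rm lawn i ≤ ra i)
    (hca : ∀ j < cols, SmallLawn lawn rows cols → Cm lawn j ≤ ca j) :
    (List.range rows).foldl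
      (fun cur r => if possible (runRow cur r hgt) lawn then runRow cur r hgt else cur)
      (bld rows cols ra ca)
    = bld rows cols
        (fun i => if SmallLawn lawn rows cols ∧ Rm lawn i ≤ hgt then min (ra i) hgt else ra i)
        ca := by
  have aux : ∀ k, k ≤ rows →
      (List.range k).foldl
        (fun cur r => if possible (runRow cur r hgt) lawn then runRow cur r hgt else cur)
        (bld rows cols ra ca)
      = bld rows cols
          (fun i => if i < k ∧ SmallLawn lawn rows cols ∧ Rm lawn i ≤ hgt then min (ra i) hgt else ra i)
          ca := by
    intro k
    induction k with
    | zero =>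
      intro _
      simp only [List.range_zero, List.foldl_nil]
      exact bld_congr (fun i _ => by simp) (fun j _ => rfl)
    | succ k ih =>
      intro hk
      have hkrows : k < rows := Nat.lt_of_succ_le hk
      rw [List.range_succ, List.foldl_append, ih (Nat.le_of_succ_le hk)]
      simp only [List.foldl_cons, List.foldl_nil]
      have hrak : ∀ i < rows, SmallLawn lawn rows cols →
          Rm lawn i ≤ (fun i => if i < k ∧ SmallLawn lawn rows cols ∧ Rm lawn i ≤ hgt
            then min (ra i) hgt else ra i) i := by
        intro i hi hsm
        dsimp only
        split_ifs with hcond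
        · exact le_min (hra i hi hsm) hcond.2.2
        · exact hra i hi hsm
      rw [runRow_bld _ _ _ hkrows]
      have hiff : ∀ i, i ≠ k →
          ((i < k ∧ SmallLawn lawn rows cols ∧ Rm lawn i ≤ hgt)
            ↔ (i < k + 1 ∧ SmallLawn lawn rows cols ∧ Rm lawn i ≤ hgt)) := by
        intro i hik
        constructor
        · rintro ⟨h1, h2⟩; exact ⟨by omega, h2⟩
        · rintro ⟨h1, h2⟩; exact ⟨by omega, h2⟩
      by_cases hacc : SmallLawn lawn rows cols ∧ Rm lawn k ≤ hgt
      · rw [if_pos ((poss_row_iff hgt _ _ hrows hrect h0c hkrows hrak hca).mpr hacc)]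
        apply bld_congr (fun i _ => ?_) (fun j _ => rfl)
        dsimp only
        by_cases hik : i = k
        · subst hik
          rw [if_pos rfl, if_neg (fun hcon => absurd hcon.1 (lt_irrefl i)),
            if_pos ⟨Nat.lt_succ_self i, hacc⟩]
        · rw [if_neg hik]
          exact if_congr (hiff i hik) rfl rfl
      · rw [if_neg (fun hp => hacc ((poss_row_iff hgt _ _ hrows hrect h0c hkrows hrak hca).mp hp))]
        apply bld_congr (fun i _ => ?_) (fun j _ => rfl)
        dsimp only
        by_cases hik : i = k
        · subst hik
          rw [if_neg (fun hcon => absurd hcon.1 (lt_irrefl i)),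
            if_neg (fun hcon => hacc hcon.2)]
        · exact if_congr (hiff i hik) rfl rfl
  rw [aux rows le_rfl]
  exact bld_congr (fun i hi => by simp [hi]) (fun j _ => rfl)

theorem colFold {lawn : List (List Int)} {rows cols : Nat} (hgt : Int) (ra ca : Nat → Int)
    (hrows : lawn.length = rows) (hrect : ∀ i < rows, (lawn.getD i []).length = cols)
    (h0r : 0 < rows)
    (hra : ∀ i < rows, SmallLawn lawn rows cols → Rm lawn i ≤ ra i)
    (hca : ∀ j < cols, SmallLawn lawn rows cols → Cm lawn j ≤ ca j) :
    (List.range cols).foldl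
      (fun cur c => if possible (runCol cur c hgt) lawn then runCol cur c hgt else cur)
      (bld rows cols ra ca)
    = bld rows cols ra
        (fun j => if SmallLawn lawn rows cols ∧ Cm lawn j ≤ hgt then min (ca j) hgt else ca j) := by
  have aux : ∀ k, k ≤ cols →
      (List.range k).foldl
        (fun cur c => if possible (runCol cur c hgt) lawn then runCol cur c hgt else cur)
        (bld rows cols ra ca)
      = bld rows cols ra
          (fun j => if j < k ∧ SmallLawn lawn rows cols ∧ Cm lawn j ≤ hgt
            then min (ca j) hgt else ca j) := by
    intro k
    induction k with
    | zero =>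
      intro _
      simp only [List.range_zero, List.foldl_nil]
      exact bld_congr (fun i _ => rfl) (fun j _ => by simp)
    | succ k ih =>
      intro hk
      have hkcols : k < cols := Nat.lt_of_succ_le hk
      rw [List.range_succ, List.foldl_append, ih (Nat.le_of_succ_le hk)]
      simp only [List.foldl_cons, List.foldl_nil]
      have hcak : ∀ j < cols, SmallLawn lawn rows cols →
          Cm lawn j ≤ (fun j => if j < k ∧ SmallLawn lawn rows cols ∧ Cm lawn j ≤ hgt
            then min (ca j) hgt else ca j) j := by
        intro j hj hsm
        dsimp only
        split_ifs with hcond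
        · exact le_min (hca j hj hsm) hcond.2.2
        · exact hca j hj hsm
      rw [runCol_bld _ _ _ hkcols]
      have hiff : ∀ j, j ≠ k →
          ((j < k ∧ SmallLawn lawn rows cols ∧ Cm lawn j ≤ hgt)
            ↔ (j < k + 1 ∧ SmallLawn lawn rows cols ∧ Cm lawn j ≤ hgt)) := by
        intro j hjk
        constructor
        · rintro ⟨h1, h2⟩; exact ⟨by omega, h2⟩
        · rintro ⟨h1, h2⟩; exact ⟨by omega, h2⟩
      by_cases hacc : SmallLawn lawn rows cols ∧ Cm lawn k ≤ hgt
      · rw [if_pos ((poss_col_iff hgt _ _ hrows hrect h0r hkcols hra hcak).mpr hacc)]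
        apply bld_congr (fun i _ => rfl) (fun j _ => ?_)
        dsimp only
        by_cases hjk : j = k
        · subst hjk
          rw [if_pos rfl, if_neg (fun hcon => absurd hcon.1 (lt_irrefl j)),
            if_pos ⟨Nat.lt_succ_self j, hacc⟩]
        · rw [if_neg hjk]
          exact if_congr (hiff j hjk) rfl rfl
      · rw [if_neg (fun hp => hacc ((poss_col_iff hgt _ _ hrows hrect h0r hkcols hra hcak).mp hp))]
        apply bld_congr (fun i _ => rfl) (fun j _ => ?_)
        dsimp only
        by_cases hjk : j = k
        · subst hjk
          rw [if_neg (fun hcon => absurd hcon.1 (lt_irrefl j)),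
            if_neg (fun hcon => hacc hcon.2)]
        · exact if_congr (hiff j hjk) rfl rfl
  rw [aux cols le_rfl]
  exact bld_congr (fun i _ => rfl) (fun j hj => by simp [hj])

theorem heightFold {lawn : List (List Int)} {rows cols : Nat}
    (hrows : lawn.length = rows) (hrect : ∀ i < rows, (lawn.getD i []).length = cols)
    (h0r : 0 < rows) (h0c : 0 < cols) :
    ∀ (hs : List Int) (ra ca : Nat → Int),
      (∀ i < rows, SmallLawn lawn rows cols → Rm lawn i ≤ ra i) →
      (∀ j < cols, SmallLawn lawn rows cols → Cm lawn j ≤ ca j) →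
      hs.foldl
        (fun cur hgt => (List.range cols).foldl
            (fun cur c => if possible (runCol cur c hgt) lawn then runCol cur c hgt else cur)
            ((List.range rows).foldl
              (fun cur r => if possible (runRow cur r hgt) lawn then runRow cur r hgt else cur)
              cur))
        (bld rows cols ra ca)
      = bld rows cols
          (fun i => hs.foldl
            (fun a hgt => if SmallLawn lawn rows cols ∧ Rm lawn i ≤ hgt then min a hgt else a)
            (ra i))
          (fun j => hs.foldl
            (fun a hgt => if SmallLawn lawn rows cols ∧ Cm lawn j ≤ hgt then min a hgt else a)
            (ca j)) := by
  intro hs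
  induction hs with
  | nil => intro ra ca _ _; simp only [List.foldl_nil]
  | cons hgt hs ih =>
    intro ra ca hra hca
    have hra1 : ∀ i < rows, SmallLawn lawn rows cols →
        Rm lawn i ≤ (fun i => if SmallLawn lawn rows cols ∧ Rm lawn i ≤ hgt
          then min (ra i) hgt else ra i) i := by
      intro i hi hsm
      dsimp only
      split_ifs with hcond
      · exact le_min (hra i hi hsm) hcond.2
      · exact hra i hi hsm
    have hca1 : ∀ j < cols, SmallLawn lawn rows cols →
        Cm lawn j ≤ (fun j => if SmallLawn lawn rows cols ∧ Cm lawn j ≤ hgt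
          then min (ca j) hgt else ca j) j := by
      intro j hj hsm
      dsimp only
      split_ifs with hcond
      · exact le_min (hca j hj hsm) hcond.2
      · exact hca j hj hsm
    simp only [List.foldl_cons]
    rw [rowFold hgt ra ca hrows hrect h0c hra hca,
      colFold hgt _ ca hrows hrect h0r hra1 hca,
      ih _ _ hra1 hca1]

theorem eq_bld_iff {lawn : List (List Int)} {rows cols : Nat} (f g : Nat → Int)
    (hrows : lawn.length = rows) (hrect : ∀ i < rows, (lawn.getD i []).length = cols) :
    lawn = bld rows cols f g
      ↔ ∀ i < rows, ∀ j < cols, cellL lawn i j = min 100 (min (f i) (g j)) := by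
  constructor
  · intro heq i hi j hj
    rw [heq, cell_bld _ _ hi hj]
  · intro hp
    apply List.ext_getElem
    · rw [length_bld, hrows]
    · intro i h1 h2
      have hi : i < rows := by rwa [hrows] at h1
      apply List.ext_getElem
      · have := hrect i hi
        rw [List.getD_eq_getElem _ _ h1] at this
        rw [this]
        simp only [bld, List.getElem_map, List.getElem_range, List.length_map, List.length_range]
      · intro j h3 h4
        have hj : j < cols := by
          have := hrect i hi
          rw [List.getD_eq_getElem _ _ h1] at this
          omega
        have hcell := hp i hi j hj
        rw [cellL, List.getD_eq_getElem _ _ h1, List.getD_eq_getElem _ _ h3] at hcell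
        rw [hcell]
        simp only [bld, List.getElem_map, List.getElem_range]

-- dict column-max pass: effect of one row (keys below the enumeration start are untouched)
theorem inner_get?_lt (row : List Int) :
    ∀ (s : Int) (d : PySem.Dict Int Int) (key : Int), key < s →
      ((PySem.List.enumerate row s).foldl
        (fun d q => d.insert q.1 (max (d.getD q.1 q.2) q.2)) d).get? key = d.get? key := by
  induction row with
  | nil => intro s d key _; simp [PySem.List.enumerate_nil]
  | cons x xs ih =>
    intro s d key hkey
    rw [PySem.List.enumerate_cons]
    simp only [List.foldl_cons]
    rw [ih (s + 1) _ key (by omega)]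
    rw [PySem.Dict.get?_insert]
    rw [if_neg (by omega)]

theorem inner_get?_at (row : List Int) :
    ∀ (s : Int) (d : PySem.Dict Int Int) (k : Nat) (hk : k < row.length),
      ((PySem.List.enumerate row s).foldl
        (fun d q => d.insert q.1 (max (d.getD q.1 q.2) q.2)) d).get? (s + k)
      = some (max (d.getD (s + k) row[k]) row[k]) := by
  induction row with
  | nil => intro s d k hk; simp at hk
  | cons x xs ih =>
    intro s d k hk
    rw [PySem.List.enumerate_cons]
    simp only [List.foldl_cons]
    match k with
    | 0 =>
      rw [show s + ((0 : Nat) : Int) = s by simp]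
      rw [inner_get?_lt xs (s + 1) _ s (by omega)]
      simpa using PySem.Dict.get?_insert_self _ _ _
    | Nat.succ k =>
      have hcast : s + ((k + 1 : Nat) : Int) = (s + 1) + (k : Int) := by push_cast; ring
      rw [hcast, ih (s + 1) _ k (by simpa using hk)]
      rw [PySem.Dict.getD_insert]
      rw [if_neg (by omega)]
      simp

theorem outer_get? (cols : Nat) :
    ∀ (rs : List (List Int)) (d : PySem.Dict Int Int) (c : Nat),
      (∀ row ∈ rs, c < row.length) →
      (rs.foldl (fun d row => (PySem.List.enumerate row).foldl
          (fun d q => d.insert q.1 (max (d.getD q.1 q.2) q.2)) d) d).get? (c : Int)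
      = rs.foldl (fun (o : Option Int) row => some (max (o.getD (row.getD c 0)) (row.getD c 0)))
          (d.get? (c : Int)) := by
  intro rs
  induction rs with
  | nil => intro d c _; rfl
  | cons row rest ih =>
    intro d c hc
    simp only [List.foldl_cons]
    rw [ih _ c (fun r hr => hc r (List.mem_cons_of_mem _ hr))]
    have hcrow : c < row.length := hc row List.mem_cons_self
    have h1 := inner_get?_at row 0 d c hcrow
    rw [show (0 : Int) + (c : Int) = (c : Int) by omega] at h1
    rw [h1]
    congr 1
    rw [PySem.Dict.getD_eq_get?_getD, List.getD_eq_getElem _ _ hcrow]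

theorem opt_fold_some (cols : Nat) (c : Nat) :
    ∀ (rest : List (List Int)) (m : Int),
      rest.foldl (fun (o : Option Int) row => some (max (o.getD (row.getD c 0)) (row.getD c 0)))
          (some m)
      = some (rest.foldl (fun a row => max a (row.getD c 0)) m) := by
  intro rest
  induction rest with
  | nil => intro m; rfl
  | cons row rest ih => intro m; simp only [List.foldl_cons, Option.getD_some]; exact ih _

theorem colmax_getD (lawn : List (List Int)) (c : Nat)
    (hne : lawn ≠ [])
    (hc : ∀ row ∈ lawn, c < row.length) :
    (lawn.foldl (fun d row => (PySem.List.enumerate row).foldl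
        (fun d q => d.insert q.1 (max (d.getD q.1 q.2) q.2)) d) PySem.Dict.empty).getD (c : Int) 0
    = Cm lawn c := by
  rw [PySem.Dict.getD_eq_get?_getD, outer_get? (lawn.headD []).length lawn _ c hc]
  obtain ⟨r0, rest, rfl⟩ : ∃ r0 rest, lawn = r0 :: rest := by
    cases lawn with
    | nil => exact absurd rfl hne
    | cons a l => exact ⟨a, l, rfl⟩
  simp only [List.foldl_cons]
  rw [show (PySem.Dict.empty : PySem.Dict Int Int).get? (c : Int) = none from rfl]
  simp only [Option.getD_none, max_self]
  rw [opt_fold_some (r0 :: rest).length c rest (r0.getD c 0)]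
  rw [Cm, List.map_cons, PySem.List.max?_id_cons, Option.getD_some, List.foldl_map]
  rw [Option.getD_some]

-- B's comparison, pointwise, on a rectangular lawn
theorem alt_eq_ite (lawn : List (List Int)) (hne : lawn ≠ [])
    (hrect : ∀ i < lawn.length, (lawn.getD i []).length = (lawn.headD []).length)
    (h0c : 0 < (lawn.headD []).length) :
    solve_alt lawn = if (∀ i < lawn.length, ∀ j < (lawn.headD []).length,
        cellL lawn i j = min (min 100 (Rm lawn i)) (Cm lawn j)) then "YES" else "NO" := by
  have hcall : ∀ row ∈ lawn, ∀ j < (lawn.headD []).length, j < row.length := by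
    intro row hrow j hj
    obtain ⟨i, hi, rfl⟩ := List.mem_iff_getElem.mp hrow
    have := hrect i hi
    rw [List.getD_eq_getElem _ _ hi] at this
    omega
  have hcm : ∀ j < (lawn.headD []).length,
      (lawn.foldl (fun d row => (PySem.List.enumerate row).foldl
          (fun d q => d.insert q.1 (max (d.getD q.1 q.2) q.2)) d) PySem.Dict.empty).getD (j : Int) 0
      = Cm lawn j := by
    intro j hj
    exact colmax_getD lawn j hne (fun row hrow => hcall row hrow j hj)
  have hb : (lawn = lawn.map (fun row => (List.range (lawn.headD []).length).map
        (fun (c : Nat) => min (min 100 ((PySem.List.max? row (fun x => x)).getD 0))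
          ((lawn.foldl (fun d row => (PySem.List.enumerate row).foldl
            (fun d q => d.insert q.1 (max (d.getD q.1 q.2) q.2)) d) PySem.Dict.empty).getD (c : Int) 0))))
      ↔ (∀ i < lawn.length, ∀ j < (lawn.headD []).length,
          cellL lawn i j = min (min 100 (Rm lawn i)) (Cm lawn j)) := by
    constructor
    · intro heq i hi j hj
      have hrow : lawn.getD i [] = (List.range (lawn.headD []).length).map
          (fun (c : Nat) => min (min 100 ((PySem.List.max? (lawn[i]'hi) (fun x => x)).getD 0))
            ((lawn.foldl (fun d row => (PySem.List.enumerate row).foldl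
              (fun d q => d.insert q.1 (max (d.getD q.1 q.2) q.2)) d) PySem.Dict.empty).getD (c : Int) 0)) := by
        conv_lhs => rw [heq]
        rw [List.getD_eq_getElem _ _ (by simpa using hi), List.getElem_map]
      rw [cellL, hrow, getD_map_range_at _ _ hj, hcm j hj]
      rw [Rm, List.getD_eq_getElem _ _ hi]
    · intro hp
      apply List.ext_getElem (by simp)
      intro i h1 h2
      rw [List.getElem_map]
      apply List.ext_getElem
      · have := hrect i h1
        rw [List.getD_eq_getElem _ _ h1] at this
        simp [this]
      · intro j h3 h4
        have hj : j < (lawn.headD []).length := by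
          have := hrect i h1
          rw [List.getD_eq_getElem _ _ h1] at this
          omega
        have hcell := hp i h1 j hj
        rw [cellL, List.getD_eq_getElem _ _ h1, List.getD_eq_getElem _ _ h3] at hcell
        rw [hcell, List.getElem_map, List.getElem_range, hcm j hj]
        rw [Rm, List.getD_eq_getElem _ _ h1]
  simp only [solve_alt]
  by_cases hcnd : ∀ i < lawn.length, ∀ j < (lawn.headD []).length,
      cellL lawn i j = min (min 100 (Rm lawn i)) (Cm lawn j)
  · rw [if_pos (hb.mpr hcnd), if_pos hcnd]
  · rw [if_neg (fun ht => hcnd (hb.mp ht)), if_neg hcnd]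

-- A's state is always a min(100, ra, ca) grid, whatever passes get accepted
theorem exists_rowfold {rows cols : Nat} (lawn : List (List Int)) (hgt : Int) :
    ∀ (l : List Nat), (∀ r ∈ l, r < rows) → ∀ (ra ca : Nat → Int),
      ∃ ra', l.foldl
          (fun cur r => if possible (runRow cur r hgt) lawn then runRow cur r hgt else cur)
          (bld rows cols ra ca)
        = bld rows cols ra' ca := by
  intro l
  induction l with
  | nil => exact fun _ ra ca => ⟨ra, rfl⟩
  | cons r t ih =>
    intro hmem ra ca
    simp only [List.foldl_cons]
    rw [runRow_bld _ _ _ (hmem r List.mem_cons_self)]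
    by_cases hposs : possible
        (bld rows cols (fun r' => if r' = r then min (ra r') hgt else ra r') ca) lawn = true
    · rw [if_pos hposs]
      exact ih (fun x hx => hmem x (List.mem_cons_of_mem _ hx)) _ ca
    · rw [if_neg hposs]
      exact ih (fun x hx => hmem x (List.mem_cons_of_mem _ hx)) ra ca

theorem exists_colfold {rows cols : Nat} (lawn : List (List Int)) (hgt : Int) :
    ∀ (l : List Nat), (∀ c ∈ l, c < cols) → ∀ (ra ca : Nat → Int),
      ∃ ca', l.foldl
          (fun cur c => if possible (runCol cur c hgt) lawn then runCol cur c hgt else cur)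
          (bld rows cols ra ca)
        = bld rows cols ra ca' := by
  intro l
  induction l with
  | nil => exact fun _ ra ca => ⟨ca, rfl⟩
  | cons c t ih =>
    intro hmem ra ca
    simp only [List.foldl_cons]
    rw [runCol_bld _ _ _ (hmem c List.mem_cons_self)]
    by_cases hposs : possible
        (bld rows cols ra (fun c' => if c' = c then min (ca c') hgt else ca c')) lawn = true
    · rw [if_pos hposs]
      exact ih (fun x hx => hmem x (List.mem_cons_of_mem _ hx)) ra _
    · rw [if_neg hposs]
      exact ih (fun x hx => hmem x (List.mem_cons_of_mem _ hx)) ra ca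

theorem exists_heightfold {rows cols : Nat} (lawn : List (List Int)) :
    ∀ (hs : List Int) (ra ca : Nat → Int), ∃ ra' ca',
      hs.foldl
        (fun cur hgt => (List.range cols).foldl
            (fun cur c => if possible (runCol cur c hgt) lawn then runCol cur c hgt else cur)
            ((List.range rows).foldl
              (fun cur r => if possible (runRow cur r hgt) lawn then runRow cur r hgt else cur)
              cur))
        (bld rows cols ra ca)
      = bld rows cols ra' ca' := by
  intro hs
  induction hs with
  | nil => exact fun ra ca => ⟨ra, ca, rfl⟩
  | cons hgt t ih =>
    intro ra ca
    simp only [List.foldl_cons]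
    obtain ⟨ra1, h1⟩ := exists_rowfold lawn hgt (List.range rows)
      (fun r hr => List.mem_range.mp hr) ra ca
    rw [h1]
    obtain ⟨ca1, h2⟩ := exists_colfold lawn hgt (List.range cols)
      (fun c hc => List.mem_range.mp hc) ra1 ca
    rw [h2]
    exact ih ra1 ca1

theorem solve_spec' : ∀ (lawn : List (List Int)), Pre_solve lawn → solve lawn = solve_alt lawn := by
  intro lawn hpre
  obtain ⟨hne, -⟩ := hpre
  have h0r : 0 < lawn.length := List.length_pos_of_ne_nil hne
  have hcur0 : List.replicate lawn.length (List.replicate (lawn.headD []).length (100 : Int))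
      = bld lawn.length (lawn.headD []).length (fun _ => 100) (fun _ => 100) := by
    symm
    simp [bld, List.map_const']
  by_cases hrect : ∀ i < lawn.length, (lawn.getD i []).length = (lawn.headD []).length
  · by_cases h0c : 0 < (lawn.headD []).length
    · -- rectangular with nonzero width: both sides reduce to the min(100, rowmax, colmax) criterion
      have hra100 : ∀ i < lawn.length, SmallLawn lawn lawn.length (lawn.headD []).length →
          Rm lawn i ≤ (fun _ : Nat => (100 : Int)) i := by
        intro i hi hsm
        obtain ⟨c0, hc0', heq⟩ := Rm_attained (lawn := lawn) (r := i) (by rw [hrect i hi]; omega)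
        rw [hrect i hi] at hc0'
        rw [← heq]
        exact hsm i hi c0 hc0'
      have hca100 : ∀ j < (lawn.headD []).length, SmallLawn lawn lawn.length (lawn.headD []).length →
          Cm lawn j ≤ (fun _ : Nat => (100 : Int)) j := by
        intro j hj hsm
        obtain ⟨r0, hr0, heq⟩ := Cm_attained (lawn := lawn) (c := j) hne
        rw [← heq]
        exact hsm r0 hr0 j hj
      simp only [solve]
      rw [hcur0, heightFold rfl hrect h0r h0c _ _ _ hra100 hca100]
      by_cases hsm : SmallLawn lawn lawn.length (lawn.headD []).length
      · have hRa : ∀ i < lawn.length,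
            (PySem.List.sorted (PySem.Set.ofList lawn.flatten) (fun x => -x)).foldl
              (fun a hgt => if SmallLawn lawn lawn.length (lawn.headD []).length ∧ Rm lawn i ≤ hgt
                then min a hgt else a) ((fun _ : Nat => (100 : Int)) i)
            = Rm lawn i := by
          intro i hi
          have hfn : (fun (a hgt : Int) =>
              if SmallLawn lawn lawn.length (lawn.headD []).length ∧ Rm lawn i ≤ hgt
              then min a hgt else a)
              = fun a hgt => if Rm lawn i ≤ hgt then min a hgt else a := by
            funext a hgt
            exact if_congr ⟨fun h => h.2, fun h => ⟨hsm, h⟩⟩ rfl rfl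
          rw [hfn]
          apply foldl_sel_mem
          · rw [PySem.List.mem_sorted, PySem.Set.mem_ofList]
            obtain ⟨c0, hc0', heq⟩ := Rm_attained (lawn := lawn) (r := i) (by rw [hrect i hi]; omega)
            refine List.mem_flatten.mpr ⟨lawn.getD i [], ?_, ?_⟩
            · rw [List.getD_eq_getElem _ _ hi]
              exact List.getElem_mem hi
            · rw [← heq, cellL, List.getD_eq_getElem _ _ hc0']
              exact List.getElem_mem hc0'
          · exact hra100 i hi hsm
        have hCa : ∀ j < (lawn.headD []).length,
            (PySem.List.sorted (PySem.Set.ofList lawn.flatten) (fun x => -x)).foldl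
              (fun a hgt => if SmallLawn lawn lawn.length (lawn.headD []).length ∧ Cm lawn j ≤ hgt
                then min a hgt else a) ((fun _ : Nat => (100 : Int)) j)
            = Cm lawn j := by
          intro j hj
          have hfn : (fun (a hgt : Int) =>
              if SmallLawn lawn lawn.length (lawn.headD []).length ∧ Cm lawn j ≤ hgt
              then min a hgt else a)
              = fun a hgt => if Cm lawn j ≤ hgt then min a hgt else a := by
            funext a hgt
            exact if_congr ⟨fun h => h.2, fun h => ⟨hsm, h⟩⟩ rfl rfl
          rw [hfn]
          apply foldl_sel_mem
          · rw [PySem.List.mem_sorted, PySem.Set.mem_ofList]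
            obtain ⟨r0, hr0, heq⟩ := Cm_attained (lawn := lawn) (c := j) hne
            refine List.mem_flatten.mpr ⟨lawn.getD r0 [], ?_, ?_⟩
            · rw [List.getD_eq_getElem _ _ hr0]
              exact List.getElem_mem hr0
            · rw [← heq, cellL]
              have hjlen : j < (lawn.getD r0 []).length := by rw [hrect r0 hr0]; omega
              rw [List.getD_eq_getElem _ _ hjlen]
              exact List.getElem_mem hjlen
          · exact hca100 j hj hsm
        rw [show bld lawn.length (lawn.headD []).length _ _
            = bld lawn.length (lawn.headD []).length (Rm lawn) (Cm lawn) from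
          bld_congr (fun i hi => hRa i hi) (fun j hj => hCa j hj)]
        rw [alt_eq_ite lawn hne hrect h0c]
        refine if_congr ?_ rfl rfl
        rw [eq_bld_iff (Rm lawn) (Cm lawn) rfl hrect]
        constructor
        · intro hp i hi j hj
          rw [hp i hi j hj, ← min_assoc]
        · intro hp i hi j hj
          rw [hp i hi j hj, min_assoc]
      · -- some cell exceeds 100: no pass is ever accepted and both programs answer NO
        have hfin : bld lawn.length (lawn.headD []).length
            (fun i => (PySem.List.sorted (PySem.Set.ofList lawn.flatten) (fun x => -x)).foldl
              (fun a hgt => if SmallLawn lawn lawn.length (lawn.headD []).length ∧ Rm lawn i ≤ hgt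
                then min a hgt else a) ((fun _ : Nat => (100 : Int)) i))
            (fun j => (PySem.List.sorted (PySem.Set.ofList lawn.flatten) (fun x => -x)).foldl
              (fun a hgt => if SmallLawn lawn lawn.length (lawn.headD []).length ∧ Cm lawn j ≤ hgt
                then min a hgt else a) ((fun _ : Nat => (100 : Int)) j))
            = bld lawn.length (lawn.headD []).length (fun _ => 100) (fun _ => 100) := by
          apply bld_congr
          · intro i _
            have hfn : (fun (a hgt : Int) =>
                if SmallLawn lawn lawn.length (lawn.headD []).length ∧ Rm lawn i ≤ hgt
                then min a hgt else a) = fun a _ => a := by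
              funext a hgt
              rw [if_congr (iff_false_intro (fun h => hsm h.1)) rfl rfl, if_neg not_false]
            rw [hfn, List.foldl_fixed]
          · intro j _
            have hfn : (fun (a hgt : Int) =>
                if SmallLawn lawn lawn.length (lawn.headD []).length ∧ Cm lawn j ≤ hgt
                then min a hgt else a) = fun a _ => a := by
              funext a hgt
              rw [if_congr (iff_false_intro (fun h => hsm h.1)) rfl rfl, if_neg not_false]
            rw [hfn, List.foldl_fixed]
        rw [hfin]
        unfold SmallLawn at hsm
        push_neg at hsm
        obtain ⟨i0, hi0, j0, hj0, hbad⟩ := hsm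
        have hne2 : lawn ≠ bld lawn.length (lawn.headD []).length (fun _ => 100) (fun _ => 100) := by
          intro heq
          have hcell := cell_bld (rows := lawn.length) (cols := (lawn.headD []).length)
            (fun _ => (100 : Int)) (fun _ => (100 : Int)) hi0 hj0
          rw [← heq] at hcell
          simp at hcell
          omega
        rw [if_neg hne2, alt_eq_ite lawn hne hrect h0c, if_neg ?_]
        intro hp
        have hcell := hp i0 hi0 j0 hj0
        have hle : min (min (100 : Int) (Rm lawn i0)) (Cm lawn j0) ≤ 100 :=
          le_trans (min_le_left _ _) (min_le_left _ _)
        rw [hcell] at hbad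
        omega
    · -- zero-width first row and all rows empty: both answer YES
      have hcols0 : (lawn.headD []).length = 0 := by omega
      have hrows0 : ∀ i < lawn.length, lawn.getD i [] = [] := by
        intro i hi
        have := hrect i hi
        rw [hcols0] at this
        exact List.eq_nil_of_length_eq_zero this
      have hflat : lawn.flatten = [] := by
        apply List.flatten_eq_nil_iff.mpr
        intro row hrow
        obtain ⟨i, hi, rfl⟩ := List.mem_iff_getElem.mp hrow
        have := hrows0 i hi
        rwa [List.getD_eq_getElem _ _ hi] at this
      simp only [solve, solve_alt]
      rw [hflat, hcols0]
      rw [show PySem.List.sorted (PySem.Set.ofList ([] : List Int)) (fun x => -x) = [] from rfl]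
      simp only [List.foldl_nil, List.replicate_zero, List.range_zero, List.map_nil]
      rw [if_pos, if_pos]
      · apply List.ext_getElem (by simp)
        intro i h1 h2
        rw [List.getElem_map]
        have := hrows0 i h1
        rwa [List.getD_eq_getElem _ _ h1] at this
      · apply List.eq_replicate_iff.mpr
        refine ⟨rfl, fun b hb => ?_⟩
        obtain ⟨i, hi, rfl⟩ := List.mem_iff_getElem.mp hb
        have := hrows0 i hi
        rwa [List.getD_eq_getElem _ _ hi] at this
  · -- ragged lawn: A's grid stays rectangular and B's template is rectangular, both answer NO
    push_neg at hrect
    obtain ⟨i0, hi0, hbadlen⟩ := hrect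
    simp only [solve, solve_alt]
    rw [hcur0]
    obtain ⟨ra', ca', hfin⟩ := exists_heightfold lawn
      (PySem.List.sorted (PySem.Set.ofList lawn.flatten) (fun x => -x))
      (fun _ => (100 : Int)) (fun _ => (100 : Int))
    rw [hfin]
    rw [if_neg, if_neg]
    · intro heq
      apply hbadlen
      have h1 : lawn.getD i0 [] = ((lawn.map (fun row => (List.range (lawn.headD []).length).map
          (fun (c : Nat) => min (min 100 ((PySem.List.max? row (fun x => x)).getD 0))
            ((lawn.foldl (fun d row => (PySem.List.enumerate row).foldl
              (fun d q => d.insert q.1 (max (d.getD q.1 q.2) q.2)) d) PySem.Dict.empty).getD (c : Int) 0))))).getD i0 [] := by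
        conv_lhs => rw [heq]
      rw [h1, List.getD_eq_getElem _ _ (by simpa using hi0), List.getElem_map]
      simp
    · intro heq
      apply hbadlen
      have h1 : lawn.getD i0 [] = (bld lawn.length (lawn.headD []).length ra' ca').getD i0 [] := by
        conv_lhs => rw [heq]
      rw [h1, rowlen_bld _ _ _ hi0]

-- ===== VERDICT (by name: the statement is the Claim_ definition above) =====
theorem solve_spec : Claim_equal_solve := by
  intro lawn _ hpre
  exact solve_spec' lawn hpre
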